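-- pv_equiv track=rewrite | github.com/tuandatz168-bot/cc | algorithms.py | algo_luck8_streak
-- ===== SOURCE A (Python) =====
-- def algo_luck8_streak(h):
--     if len(h) < 4: return None
--     last, streak = h[-1], 1
--     for i in range(len(h)-2, -1, -1):
--         if h[i] == last:
--             streak += 1
--         else:
--             break
--     if streak >= 4:
--         return last
--     return None
-- ===== SOURCE B (Python) =====
-- def algo_luck8_streak(h):
--     if len(h) < 4:
--         return None
--     if h[-1] == h[-2] == h[-3] == h[-4]:
--         return h[-1]
--     return None
-- ===== Notes on version B (the rewrite author's own statement) =====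
-- stated objective: simpler
-- what changed: Replaces the backward streak-counting loop with a constant-time chained-equality check of the last four elements (streak >= 4 iff the last four are equal).
import Mathlib
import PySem

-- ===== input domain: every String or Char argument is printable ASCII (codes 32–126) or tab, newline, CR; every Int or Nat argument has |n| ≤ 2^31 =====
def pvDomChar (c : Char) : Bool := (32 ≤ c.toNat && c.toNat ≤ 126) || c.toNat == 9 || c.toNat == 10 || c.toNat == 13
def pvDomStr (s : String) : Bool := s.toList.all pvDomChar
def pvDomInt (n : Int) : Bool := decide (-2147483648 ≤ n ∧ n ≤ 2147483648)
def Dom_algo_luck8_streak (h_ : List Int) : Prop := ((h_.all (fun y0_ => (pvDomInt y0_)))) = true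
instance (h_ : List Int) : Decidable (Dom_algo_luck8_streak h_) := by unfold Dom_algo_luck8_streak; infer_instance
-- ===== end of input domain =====

-- B replaces A's backward streak-counting loop by a constant-time chained-equality test of the last four elements (simpler).


-- ===== PORT A =====
-- loop: for i in range(len(h)-2, -1, -1): count the streak, break on mismatch
def pvLoopA (h_ : List Int) (last : Int) : Nat → Int → Int
  | 0, streak => if h_.getD 0 0 = last then streak + 1 else streak
  | i+1, streak => if h_.getD (i+1) 0 = last then pvLoopA h_ last i (streak + 1) else streak

def algo_luck8_streak (h_ : List Int) : Option Int :=
  if h_.length < 4 then none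
  else
    let last := h_.getD (h_.length - 1) 0   -- h[-1], in range since len ≥ 4
    let streak := pvLoopA h_ last (h_.length - 2) 1
    if streak ≥ 4 then some last else none

-- ===== PORT B =====
-- h[-k] ported as getD (len - k): in range given the len ≥ 4 guard
def algo_luck8_streak_alt (h_ : List Int) : Option Int :=
  if h_.length < 4 then none
  else
    let n := h_.length
    if h_.getD (n-1) 0 = h_.getD (n-2) 0 ∧ h_.getD (n-2) 0 = h_.getD (n-3) 0
        ∧ h_.getD (n-3) 0 = h_.getD (n-4) 0 then some (h_.getD (n-1) 0)
    else none

-- ===== PRECONDITION & SPEC =====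
def Spec_algo_luck8_streak (h_ : List Int) (out : Option Int) : Prop := out = algo_luck8_streak_alt h_
instance (h_ : List Int) (out : Option Int) : Decidable (Spec_algo_luck8_streak h_ out) := by unfold Spec_algo_luck8_streak; infer_instance

-- ===== CLAIM (what is proved, stated in full; the proofs are below) =====
def Claim_equal_algo_luck8_streak : Prop := ∀ (h_ : List Int), Dom_algo_luck8_streak h_ → Spec_algo_luck8_streak h_ (algo_luck8_streak h_)

-- ===== LEMMAS AND PROOFS =====

-- ===== VERDICT (by name: the statement is the Claim_ definition above) =====
lemma pvLoopA_mono (h_ : List Int) (last : Int) : ∀ (i : Nat) (s : Int), s ≤ pvLoopA h_ last i s := by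
  intro i
  induction i with
  | zero => intro s; simp only [pvLoopA]; split <;> omega
  | succ j ih =>
      intro s
      rw [show pvLoopA h_ last (j+1) s
            = if h_.getD (j+1) 0 = last then pvLoopA h_ last j (s + 1) else s from rfl]
      split
      · exact le_trans (by omega) (ih (s+1))
      · omega

lemma pvLoopA_ge1 (h_ : List Int) (last : Int) (k : Nat) (s : Int) :
    s + 1 ≤ pvLoopA h_ last k s ↔ h_.getD k 0 = last := by
  cases k with
  | zero =>
      rw [show pvLoopA h_ last 0 s = if h_.getD 0 0 = last then s + 1 else s from rfl]
      by_cases he : h_.getD 0 0 = last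
      · rw [if_pos he]; simp only [eq_true he, iff_true]; omega
      · simp only [if_neg he, iff_iff_implies_and_implies]
        exact ⟨fun hle => absurd (by omega : (1:Int) ≤ 0) (by omega), fun hc => absurd hc he⟩
  | succ j =>
      rw [show pvLoopA h_ last (j+1) s
            = if h_.getD (j+1) 0 = last then pvLoopA h_ last j (s + 1) else s from rfl]
      by_cases he : h_.getD (j+1) 0 = last
      · rw [if_pos he]; simp only [eq_true he, iff_true]
        exact pvLoopA_mono h_ last j (s+1)
      · simp only [if_neg he, iff_iff_implies_and_implies]
        exact ⟨fun hle => absurd (by omega : (1:Int) ≤ 0) (by omega), fun hc => absurd hc he⟩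

lemma pvLoopA_ge2 (h_ : List Int) (last : Int) (k : Nat) (s : Int) :
    s + 2 ≤ pvLoopA h_ last (k+1) s ↔ (h_.getD (k+1) 0 = last ∧ h_.getD k 0 = last) := by
  rw [show pvLoopA h_ last (k+1) s
        = if h_.getD (k+1) 0 = last then pvLoopA h_ last k (s + 1) else s from rfl]
  by_cases he : h_.getD (k+1) 0 = last
  · rw [if_pos he]
    simp only [eq_true he, true_and]
    have h1 := pvLoopA_ge1 h_ last k (s+1)
    constructor
    · intro hle; exact h1.1 (by omega)
    · intro hk; have := h1.2 hk; omega
  · rw [if_neg he]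
    simp only [eq_false he, false_and, iff_false]
    omega

lemma pvLoopA_ge3 (h_ : List Int) (last : Int) (k : Nat) (s : Int) :
    s + 3 ≤ pvLoopA h_ last (k+2) s ↔
      (h_.getD (k+2) 0 = last ∧ h_.getD (k+1) 0 = last ∧ h_.getD k 0 = last) := by
  rw [show pvLoopA h_ last (k+2) s
        = if h_.getD (k+2) 0 = last then pvLoopA h_ last (k+1) (s + 1) else s from rfl]
  by_cases he : h_.getD (k+2) 0 = last
  · rw [if_pos he]
    simp only [eq_true he, true_and]
    constructor
    · intro hle; exact (pvLoopA_ge2 h_ last k (s+1)).1 (by omega)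
    · intro hk; have := (pvLoopA_ge2 h_ last k (s+1)).2 hk; omega
  · rw [if_neg he]
    simp only [eq_false he, false_and, iff_false]
    omega

-- ===== VERDICT (by name: the statement is the Claim_ definition above) =====
theorem algo_luck8_streak_spec : Claim_equal_algo_luck8_streak := by
  intro h_ _
  unfold Spec_algo_luck8_streak algo_luck8_streak algo_luck8_streak_alt
  by_cases hlen : h_.length < 4
  · simp [hlen]
  · simp only [hlen, if_false]
    have hlen4 : 4 ≤ h_.length := by omega
    set last := h_.getD (h_.length - 1) 0 with hl
    have hk : h_.length - 2 = (h_.length - 4) + 2 := by omega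
    have h3 := pvLoopA_ge3 h_ last (h_.length - 4) 1
    have e1 : (h_.length - 4) + 1 = h_.length - 3 := by omega
    rw [← hk, e1] at h3
    by_cases hs : (4:Int) ≤ pvLoopA h_ last (h_.length - 2) 1
    · have hc := h3.1 (by omega)
      simp only [ge_iff_le, hs, if_true]
      rw [if_pos ⟨hc.1.symm, hc.1.trans hc.2.1.symm, hc.2.1.trans hc.2.2.symm⟩]
    · simp only [ge_iff_le, hs, if_false]
      rw [if_neg]
      intro ⟨a1, a2, a3⟩
      have : (1:Int) + 3 ≤ pvLoopA h_ last (h_.length - 2) 1 :=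
        h3.2 ⟨a1.symm, a1 ▸ a2.symm, by rw [← a3, ← a2, ← a1]⟩
      omega
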